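-- pv_equiv track=rewrite | github.com/tomo-playground/sdd-orchestrator | backend/services/validation.py | _is_composite_match
-- ===== SOURCE A (Python) =====
-- def _is_composite_match(prompt_token: str, tag_set: set[str]) -> bool:
--     """Check if a compound prompt token partially matches any detected tag.
--
--     Example: prompt has ``blue_shirt`` but WD14 only detected ``shirt``
--     → suffix ``shirt`` is in tag_set → partial match.
--     """
--     parts = prompt_token.split("_")
--     if len(parts) < 2:
--         return False
--     for i in range(1, len(parts)):
--         suffix = "_".join(parts[i:])
--         if suffix in tag_set:
--             return True
--     return False
-- ===== SOURCE B (Python) =====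
-- def _is_composite_match(prompt_token: str, tag_set: set[str]) -> bool:
--     """Scan the token once: at every underscore, test the remainder of the
--     string (no split/join rebuilding of suffixes)."""
--     for i, ch in enumerate(prompt_token):
--         if ch == "_" and prompt_token[i + 1:] in tag_set:
--             return True
--     return False
-- ===== Notes on version B (the rewrite author's own statement) =====
-- stated objective: simpler
-- what changed: Instead of splitting on '_' and re-joining each tail of the parts list, B scans the string once and, at each underscore, tests the slice after it for membership.
import Mathlib
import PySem

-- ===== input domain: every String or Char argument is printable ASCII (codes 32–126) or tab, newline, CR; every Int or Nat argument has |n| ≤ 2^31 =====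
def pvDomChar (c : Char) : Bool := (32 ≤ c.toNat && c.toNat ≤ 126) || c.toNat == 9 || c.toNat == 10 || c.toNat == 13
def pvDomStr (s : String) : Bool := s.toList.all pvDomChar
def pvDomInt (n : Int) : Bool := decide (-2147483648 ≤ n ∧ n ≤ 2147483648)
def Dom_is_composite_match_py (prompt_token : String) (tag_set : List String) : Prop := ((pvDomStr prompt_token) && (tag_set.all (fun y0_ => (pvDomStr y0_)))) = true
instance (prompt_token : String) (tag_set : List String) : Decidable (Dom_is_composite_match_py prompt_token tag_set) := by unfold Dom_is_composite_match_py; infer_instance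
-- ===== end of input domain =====

-- B replaces A's split/re-join of every tail by a single scan that tests the slice after each underscore; objective: simpler.


-- ===== PORT A =====
def is_composite_match_py (prompt_token : String) (tag_set : List String) : Bool :=
  let parts := PySem.Chars.splitOn prompt_token.toList "_".toList
  if parts.length < 2 then false
  else (PySem.List.pyRange 1 (parts.length : Int) 1).any fun i =>
    PySem.Set.contains tag_set
      (String.ofList (PySem.Chars.join "_".toList (PySem.List.slice parts (some i) none)))

-- ===== PORT B =====
def is_composite_match_py_alt (prompt_token : String) (tag_set : List String) : Bool :=
  (PySem.List.enumerate prompt_token.toList).any fun p =>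
    p.2 == '_' && PySem.Set.contains tag_set (PySem.Str.slice prompt_token (some (p.1 + 1)) none)

-- ===== PRECONDITION & SPEC =====
def Spec_is_composite_match_py (prompt_token : String) (tag_set : List String) (out : Bool) : Prop := out = is_composite_match_py_alt prompt_token tag_set
instance (prompt_token : String) (tag_set : List String) (out : Bool) : Decidable (Spec_is_composite_match_py prompt_token tag_set out) := by unfold Spec_is_composite_match_py; infer_instance

-- ===== CLAIM (what is proved, stated in full; the proofs are below) =====
def Claim_equal_is_composite_match_py : Prop := ∀ (prompt_token : String) (tag_set : List String), Dom_is_composite_match_py prompt_token tag_set → Spec_is_composite_match_py prompt_token tag_set (is_composite_match_py prompt_token tag_set)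

-- ===== LEMMAS AND PROOFS =====

-- accumulator-style single-char split, mirroring PySem.Chars.splitOn.go without fuel
def pvSl (c : Char) : List Char → List Char → List (List Char)
  | [], cur => [cur.reverse]
  | x :: xs, cur => if c == x then cur.reverse :: pvSl c xs [] else pvSl c xs (x :: cur)

-- pure (no-accumulator) version of the split
def pvSlP (c : Char) : List Char → List (List Char)
  | [] => [[]]
  | x :: xs => if c == x then [] :: pvSlP c xs else (x :: (pvSlP c xs).headI) :: (pvSlP c xs).tail

-- the recursive specification both ports are reduced to
def pvSpec (tag : List String) : List Char → Bool
  | [] => false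
  | x :: xs => (x == '_' && PySem.Set.contains tag (String.ofList xs)) || pvSpec tag xs

-- "any join of a nonempty suffix matches"
def pvSuffAny (g : List (List Char) → Bool) : List (List Char) → Bool
  | [] => false
  | p :: ps => g (p :: ps) || pvSuffAny g ps

theorem pvSlP_ne_nil (c : Char) (l : List Char) : pvSlP c l ≠ [] := by
  cases l with
  | nil => simp [pvSlP]
  | cons x xs => simp only [pvSlP]; split <;> simp

theorem pv_go_spec (c : Char) : ∀ (fuel : Nat) (l cur : List Char) (acc : List (List Char)),
    l.length < fuel →
    PySem.Chars.splitOn.go [c] fuel l cur acc = acc.reverse ++ pvSl c l cur := by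
  intro fuel
  induction fuel with
  | zero => intro l cur acc h; omega
  | succ n ih =>
    intro l cur acc h
    cases l with
    | nil => simp [PySem.Chars.splitOn.go, pvSl]
    | cons x xs =>
      by_cases hc : c = x
      · subst hc
        have hpre : List.isPrefixOf [c] (c :: xs) = true := by simp [List.isPrefixOf]
        simp only [PySem.Chars.splitOn.go, hpre, if_true, List.length_cons,
          List.length_nil, Nat.zero_add, List.drop_succ_cons, List.drop_zero]
        rw [ih xs [] (cur.reverse :: acc) (by simpa using Nat.lt_of_succ_lt_succ h)]
        simp [pvSl]
      · have hpre : List.isPrefixOf [c] (x :: xs) = false := by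
          simp [List.isPrefixOf, hc]
        simp only [PySem.Chars.splitOn.go, hpre, Bool.false_eq_true, if_false]
        rw [ih xs (x :: cur) acc (by simpa using Nat.lt_of_succ_lt_succ h)]
        simp [pvSl, hc]

theorem pvSl_eq_slP (c : Char) : ∀ (l cur : List Char),
    pvSl c l cur = (pvSlP c l).modifyHead (fun t => cur.reverse ++ t) := by
  intro l
  induction l with
  | nil => intro cur; simp [pvSl, pvSlP]
  | cons x xs ih =>
    intro cur
    have hnil : pvSl c xs [] = pvSlP c xs := by
      rw [ih []]
      cases h : pvSlP c xs with
      | nil => rfl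
      | cons a t => simp
    by_cases hc : c = x
    · subst hc
      simp [pvSl, pvSlP, hnil]
    · obtain ⟨h, t, hht⟩ : ∃ h t, pvSlP c xs = h :: t := by
        cases hx : pvSlP c xs with
        | nil => exact absurd hx (pvSlP_ne_nil c xs)
        | cons h t => exact ⟨h, t, rfl⟩
      simp [pvSl, pvSlP, hc, ih (x :: cur), hht]

theorem pvSl_nil (c : Char) (l : List Char) : pvSl c l [] = pvSlP c l := by
  rw [pvSl_eq_slP]
  cases h : pvSlP c l with
  | nil => rfl
  | cons a t => simp

theorem pv_splitOn_eq (c : Char) (l : List Char) :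
    PySem.Chars.splitOn l [c] = pvSlP c l := by
  unfold PySem.Chars.splitOn
  rw [pv_go_spec c (l.length + 1) l [] [] (by omega)]
  simp [pvSl_nil]

theorem pv_join_slP (c : Char) : ∀ l : List Char, PySem.Chars.join [c] (pvSlP c l) = l := by
  intro l
  induction l with
  | nil => simp [pvSlP, PySem.Chars.join_singleton]
  | cons x xs ih =>
    obtain ⟨h, t, hht⟩ : ∃ h t, pvSlP c xs = h :: t := by
      cases hx : pvSlP c xs with
      | nil => exact absurd hx (pvSlP_ne_nil c xs)
      | cons h t => exact ⟨h, t, rfl⟩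
    by_cases hc : c = x
    · subst hc
      rw [hht] at ih
      simp only [pvSlP, beq_self_eq_true, if_true, hht, PySem.Chars.join_cons_cons, ih]
      simp
    · rw [hht] at ih
      simp only [pvSlP, hht, List.headI, List.tail]
      rw [if_neg (by simpa using hc)]
      cases t with
      | nil =>
        rw [PySem.Chars.join_singleton] at ih ⊢
        simp [ih]
      | cons b t' =>
        rw [PySem.Chars.join_cons_cons] at ih ⊢
        simp [ih]

theorem pv_loop_eq (g : List (List Char) → Bool) :
    ∀ (tailps q : List (List Char)) (j : Nat), q.drop j = tailps → j ≤ q.length →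
    (PySem.List.pyRange (j : Int) (q.length : Int) 1).any
      (fun i => g (PySem.List.slice q (some i) none)) = pvSuffAny g tailps := by
  intro tailps
  induction tailps with
  | nil =>
    intro q j hdrop hj
    have : q.length ≤ j := by
      by_contra hlt
      have := List.drop_eq_nil_iff.mp hdrop
      omega
    have hj' : j = q.length := le_antisymm hj this
    subst hj'
    rw [PySem.List.pyRange_one_eq_nil (le_refl _)]
    simp [pvSuffAny]
  | cons p ps ih =>
    intro q j hdrop hj
    have hjlt : j < q.length := by
      by_contra hge
      have : q.drop j = [] := List.drop_eq_nil_iff.mpr (by omega)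
      simp [this] at hdrop
    rw [PySem.List.pyRange_one_cons (by exact_mod_cast hjlt)]
    simp only [List.any_cons]
    rw [PySem.List.slice_from_natCast, hdrop]
    have hdrop' : q.drop (j + 1) = ps := by
      rw [← List.tail_drop, hdrop]; rfl
    have := ih q (j + 1) hdrop' (by omega)
    push_cast at this ⊢
    rw [this]
    simp [pvSuffAny]

theorem pv_mainA (tag : List String) :
    ∀ l : List Char,
      pvSuffAny (fun ps => PySem.Set.contains tag (String.ofList (PySem.Chars.join ['_'] ps)))
        ((pvSlP '_' l).tail) = pvSpec tag l := by
  intro l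
  induction l with
  | nil => simp [pvSlP, pvSuffAny, pvSpec]
  | cons x xs ih =>
    obtain ⟨h, t, hht⟩ : ∃ h t, pvSlP '_' xs = h :: t := by
      cases hx : pvSlP '_' xs with
      | nil => exact absurd hx (pvSlP_ne_nil '_' xs)
      | cons h t => exact ⟨h, t, rfl⟩
    rw [hht] at ih
    simp only [List.tail_cons] at ih
    by_cases hc : x = '_'
    · subst hc
      have hjoin : PySem.Chars.join ['_'] (h :: t) = xs := by
        have := pv_join_slP '_' xs
        rwa [hht] at this
      simp only [pvSlP, beq_self_eq_true, if_true, List.tail_cons]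
      rw [hht]
      simp only [pvSuffAny]
      rw [hjoin, ih]
      simp only [pvSpec, beq_self_eq_true, Bool.true_and]
    · have hne : ('_' == x) = false := beq_eq_false_iff_ne.mpr (fun h => hc h.symm)
      have hx : (x == '_') = false := beq_eq_false_iff_ne.mpr hc
      simp only [pvSlP, hne, Bool.false_eq_true, if_false, hht, List.tail_cons]
      rw [ih]
      simp [pvSpec, hx]

theorem pv_mainB (tag : List String) (full : List Char) :
    ∀ (l : List Char) (j : Nat), full.drop j = l →
    (PySem.List.enumerate l (j : Int)).any
      (fun p => p.2 == '_' && PySem.Set.contains tag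
        (String.ofList (PySem.List.slice full (some (p.1 + 1)) none))) = pvSpec tag l := by
  intro l
  induction l with
  | nil => intro j _; simp [PySem.List.enumerate_nil, pvSpec]
  | cons x xs ih =>
    intro j hdrop
    rw [PySem.List.enumerate_cons]
    simp only [List.any_cons]
    have hxs : full.drop (j + 1) = xs := by
      rw [← List.tail_drop, hdrop]; rfl
    have hslice : PySem.List.slice full (some ((j : Int) + 1)) none = xs := by
      have : ((j : Int) + 1) = ((j + 1 : Nat) : Int) := by push_cast; ring
      rw [this, PySem.List.slice_from_natCast, hxs]
    rw [hslice]
    have := ih (j + 1) hxs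
    push_cast at this ⊢
    rw [this]
    simp [pvSpec]

-- ===== VERDICT (by name: the statement is the Claim_ definition above) =====
theorem is_composite_match_py_spec : Claim_equal_is_composite_match_py := by
  intro prompt_token tag_set _
  unfold Spec_is_composite_match_py is_composite_match_py is_composite_match_py_alt
  have hsep : "_".toList = ['_'] := rfl
  rw [hsep, pv_splitOn_eq '_' prompt_token.toList]
  have hA := pv_loop_eq
    (fun ps => PySem.Set.contains tag_set (String.ofList (PySem.Chars.join ['_'] ps)))
    ((pvSlP '_' prompt_token.toList).tail) (pvSlP '_' prompt_token.toList) 1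
    (by simp [List.drop_one])
    (by have := pvSlP_ne_nil '_' prompt_token.toList
        cases h : pvSlP '_' prompt_token.toList with
        | nil => exact absurd h this
        | cons a t => simp)
  have hB := pv_mainB tag_set prompt_token.toList prompt_token.toList 0 (by simp)
  have hBport : (PySem.List.enumerate prompt_token.toList).any
      (fun p => p.2 == '_' && PySem.Set.contains tag_set
        (PySem.Str.slice prompt_token (some (p.1 + 1)) none)) = pvSpec tag_set prompt_token.toList := by
    rw [← hB]
    simp [PySem.Str.slice]
  rw [hBport]
  by_cases hlen : (pvSlP '_' prompt_token.toList).length < 2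
  · obtain ⟨a, ha⟩ : ∃ a, pvSlP '_' prompt_token.toList = [a] := by
      cases h : pvSlP '_' prompt_token.toList with
      | nil => exact absurd h (pvSlP_ne_nil '_' prompt_token.toList)
      | cons a t =>
        cases t with
        | nil => exact ⟨a, rfl⟩
        | cons b t' => rw [h] at hlen; simp at hlen
    rw [if_pos hlen]
    rw [← pv_mainA tag_set prompt_token.toList, ha]
    simp [pvSuffAny]
  · rw [if_neg hlen]
    beta_reduce at hA
    simp only [Nat.cast_one] at hA
    rw [hA, pv_mainA]
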